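-- pv_equiv track=rewrite | github.com/yumiqaq/DME-master | DME.py | int_to_bytes_to_str
-- ===== SOURCE A (Python) =====
-- def int_to_bytes_to_str(value, length):
--     result = []
--     for i in range(0, length):
--         result.append(value >> (i * 8) & 0xff)
--     result.reverse()
--     res_str = ''
--     for num in result:
--         res_str += chr(num)
--     return res_str
-- ===== SOURCE B (Python) =====
-- def int_to_bytes_to_str(value, length):
--     # Divide and conquer: a block of `length` bytes is the high `length - half`
--     # bytes of (value >> 8*half) followed by the low `half` bytes of value;
--     # the base case emits one masked byte.  No linear loop, no reverse.
--     if length <= 0: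
--         return ''
--     if length == 1:
--         return chr(value & 0xff)
--     half = length // 2
--     return (int_to_bytes_to_str(value >> (8 * half), length - half)
--             + int_to_bytes_to_str(value, half))
-- ===== Notes on version B (the rewrite author's own statement) =====
-- stated objective: alternative
-- what changed: B replaces A's linear append-then-reverse loop by a divide-and-conquer recursion: a length-n block is the high n-n//2 bytes of value>>(8*(n//2)) concatenated with the low n//2 bytes of value, with a single masked byte as the base case.
import Mathlib
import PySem

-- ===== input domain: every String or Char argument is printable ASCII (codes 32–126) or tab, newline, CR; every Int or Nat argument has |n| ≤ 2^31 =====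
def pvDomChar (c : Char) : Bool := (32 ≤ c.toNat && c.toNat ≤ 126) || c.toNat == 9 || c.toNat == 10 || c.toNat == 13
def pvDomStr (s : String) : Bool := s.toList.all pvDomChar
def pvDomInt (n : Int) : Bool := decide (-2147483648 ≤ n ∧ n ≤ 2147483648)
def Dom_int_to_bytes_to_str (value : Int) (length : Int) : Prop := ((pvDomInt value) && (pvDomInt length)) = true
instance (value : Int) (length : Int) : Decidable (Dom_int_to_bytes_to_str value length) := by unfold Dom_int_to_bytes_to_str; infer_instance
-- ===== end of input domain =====

-- B is a divide-and-conquer recursion (high half ++ low half, one masked byte at the base)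
-- instead of A's linear append-then-reverse loop; alternative decomposition, same cost.


-- ===== PORT A =====
def int_to_bytes_to_str (value : Int) (length : Int) : String :=
  let result : List Int :=
    (PySem.List.pyRange 0 length 1).foldl
      (fun acc i => acc ++ [PySem.Int.band (value >>> (i * 8).toNat) 255]) []
  let result := result.reverse
  result.foldl (fun s num => s.push (Char.ofNat num.toNat)) ""

-- ===== PORT B =====
def int_to_bytes_to_str_alt (value : Int) (length : Int) : String :=
  if length ≤ 0 then ""
  else if length = 1 then String.ofList [Char.ofNat (PySem.Int.band value 255).toNat]
  else
    let half := PySem.Int.floordiv length 2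
    int_to_bytes_to_str_alt (value >>> (8 * half).toNat) (length - half)
      ++ int_to_bytes_to_str_alt value half
termination_by length.toNat
decreasing_by
  · rw [PySem.Int.floordiv_eq_ediv_of_pos (by omega)]; omega
  · rw [PySem.Int.floordiv_eq_ediv_of_pos (by omega)]; omega

-- ===== PRECONDITION & SPEC =====
def Spec_int_to_bytes_to_str (value : Int) (length : Int) (out : String) : Prop := out = int_to_bytes_to_str_alt value length
instance (value : Int) (length : Int) (out : String) : Decidable (Spec_int_to_bytes_to_str value length out) := by unfold Spec_int_to_bytes_to_str; infer_instance

-- ===== CLAIM (what is proved, stated in full; the proofs are below) =====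
def Claim_equal_int_to_bytes_to_str : Prop := ∀ (value : Int) (length : Int), Dom_int_to_bytes_to_str value length → Spec_int_to_bytes_to_str value length (int_to_bytes_to_str value length)

-- ===== LEMMAS AND PROOFS =====
def pvByte (v : Int) (i : Nat) : Char := Char.ofNat (PySem.Int.band (v >>> (8 * i)) 255).toNat

def pvBE (v : Int) (n : Nat) : List Char := ((List.range n).map (pvByte v)).reverse

theorem pvByte_shift (v : Int) (b i : Nat) : pvByte (v >>> (8 * b)) i = pvByte v (i + b) := by
  unfold pvByte
  rw [show 8 * (i + b) = 8 * b + 8 * i by ring]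
  rw [show v >>> (8 * b + 8 * i) = (v >>> (8 * b)) >>> (8 * i) by simp [Int.shiftRight_add]]

theorem pvBE_split (v : Int) (a b : Nat) :
    pvBE v (b + a) = pvBE (v >>> (8 * b)) a ++ pvBE v b := by
  unfold pvBE
  rw [List.range_add, List.map_append, List.reverse_append, List.map_map]
  congr 2
  apply List.map_congr_left
  intro i _
  simp [Function.comp, pvByte_shift, Nat.add_comm]

theorem alt_eq_aux : ∀ (n : Nat) (v length : Int), length.toNat = n →
    int_to_bytes_to_str_alt v length = String.ofList (pvBE v length.toNat) := by
  intro n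
  induction n using Nat.strong_induction_on with
  | _ n ih =>
    intro v length hn
    unfold int_to_bytes_to_str_alt
    split
    · next h =>
      simp [pvBE, show length.toNat = 0 by omega]
    · split
      · next h1 h2 =>
        subst h2
        simp [pvBE, pvByte]
      · next h1 h2 =>
        have hfd : PySem.Int.floordiv length 2 = length / 2 :=
          PySem.Int.floordiv_eq_ediv_of_pos (by omega)
        simp only [hfd]
        have hlen2 : 2 ≤ length := by omega
        have hhalf1 : 1 ≤ length / 2 := by omega
        have hhalf2 : length / 2 < length := by omega
        rw [ih (length - length / 2).toNat (by omega) _ _ rfl,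
            ih (length / 2).toNat (by omega) _ _ rfl]
        rw [show length.toNat = (length / 2).toNat + (length - length / 2).toNat by omega]
        rw [pvBE_split]
        rw [show (8 * (length / 2)).toNat = 8 * (length / 2).toNat by omega]
        simp [String.ofList_append]

theorem alt_eq (v length : Int) :
    int_to_bytes_to_str_alt v length = String.ofList (pvBE v length.toNat) :=
  alt_eq_aux length.toNat v length rfl

theorem foldl_append_singleton {α β : Type} (f : α → β) (l : List α) (init : List β) :
    l.foldl (fun acc i => acc ++ [f i]) init = init ++ l.map f := by
  induction l generalizing init with
  | nil => simp
  | cons x xs ih => simp [List.foldl_cons, ih]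

theorem push_eq_append (s : String) (c : Char) : s.push c = s ++ String.ofList [c] :=
  (String.append_left_inj s).mp rfl

theorem foldl_push (l : List Int) (s : String) :
    l.foldl (fun s num => s.push (Char.ofNat num.toNat)) s
      = s ++ String.ofList (l.map (fun num => Char.ofNat num.toNat)) := by
  induction l generalizing s with
  | nil => simp
  | cons x xs ih =>
      rw [List.foldl_cons, ih, push_eq_append]
      simp [String.append_assoc, ← String.ofList_append]

theorem a_eq (value length : Int) :
    int_to_bytes_to_str value length = String.ofList (pvBE value length.toNat) := by
  unfold int_to_bytes_to_str
  simp only [PySem.List.pyRange_one, Int.sub_zero, Int.zero_add]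
  rw [foldl_append_singleton, foldl_push]
  simp only [List.nil_append, List.map_map, String.empty_append]
  unfold pvBE
  simp only [List.map_map, ← List.map_reverse]
  congr 1
  apply List.map_congr_left
  intro k _
  show Char.ofNat (PySem.Int.band (value >>> ((((k:Int) * 8).toNat : Nat) : Int)) 255).toNat = pvByte value k
  rw [Int.shiftRight_natCast_right, show ((k : Int) * 8).toNat = 8 * k by omega]
  rfl

-- ===== VERDICT (by name: the statement is the Claim_ definition above) =====
theorem int_to_bytes_to_str_spec : Claim_equal_int_to_bytes_to_str := by
  intro value length _
  unfold Spec_int_to_bytes_to_str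
  rw [a_eq, alt_eq]
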